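-- pv_equiv track=rewrite | github.com/INHOBBO/Programmers-Python | 프로그래머스/1/82612. 부족한 금액 계산하기/부족한 금액 계산하기.py | solution
-- ===== SOURCE A (Python) =====
-- def solution(price, money, count):
--     total_price = 0
--
--     for i in range(1, count+1):
--         total_price += price*i
--
--     result = money - total_price
--
--     if result < 0:
--         return abs(result)
--     else:
--         return 0
-- ===== SOURCE B (Python) =====
-- def solution(price, money, count):
--     n = max(count, 0)
--     need = price * n * (n + 1) // 2 - money
--     return max(need, 0)
-- ===== Notes on version B (the rewrite author's own statement) =====
-- stated objective: faster
-- what changed: Replaces the O(count) accumulation loop with the closed-form arithmetic-series sum price*count*(count+1)//2 and a max with 0.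
import Mathlib
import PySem

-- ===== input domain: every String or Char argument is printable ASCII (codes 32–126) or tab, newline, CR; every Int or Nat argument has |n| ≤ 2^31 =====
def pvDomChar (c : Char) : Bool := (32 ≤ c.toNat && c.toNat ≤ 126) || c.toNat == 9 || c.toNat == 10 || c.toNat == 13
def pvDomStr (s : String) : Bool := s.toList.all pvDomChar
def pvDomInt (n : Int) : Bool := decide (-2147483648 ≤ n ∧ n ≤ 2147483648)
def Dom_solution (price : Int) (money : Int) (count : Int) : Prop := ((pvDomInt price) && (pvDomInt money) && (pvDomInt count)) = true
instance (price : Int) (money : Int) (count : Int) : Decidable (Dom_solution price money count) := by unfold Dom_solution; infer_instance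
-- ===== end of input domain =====

-- B replaces A's O(count) accumulation loop by the closed-form arithmetic-series sum (O(1)).

-- ===== PORT A =====
def solution (price : Int) (money : Int) (count : Int) : Int :=
  let total_price := (PySem.List.pyRange 1 (count + 1) 1).foldl (fun acc i => acc + price * i) 0
  let result := money - total_price
  if result < 0 then |result| else 0

-- ===== PORT B =====
def solution_alt (price : Int) (money : Int) (count : Int) : Int :=
  let n := max count 0
  let need := PySem.Int.floordiv (price * n * (n + 1)) 2 - money
  max need 0

-- ===== PRECONDITION & SPEC =====
def Spec_solution (price : Int) (money : Int) (count : Int) (out : Int) : Prop := out = solution_alt price money count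
instance (price : Int) (money : Int) (count : Int) (out : Int) : Decidable (Spec_solution price money count out) := by unfold Spec_solution; infer_instance

-- ===== CLAIM (what is proved, stated in full; the proofs are below) =====
def Claim_equal_solution : Prop := ∀ (price : Int) (money : Int) (count : Int), Dom_solution price money count → Spec_solution price money count (solution price money count)

-- ===== LEMMAS AND PROOFS =====

-- twice the loop's sum equals price * n * (n+1), for count = n ≥ 0
theorem pv_sum_loop (price : Int) (n : Nat) :
    2 * (PySem.List.pyRange 1 ((n : Int) + 1) 1).foldl (fun acc i => acc + price * i) 0
      = price * n * (n + 1) := by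
  induction n with
  | zero => simp [PySem.List.pyRange_one_eq_nil]
  | succ k ih =>
    have h : PySem.List.pyRange 1 ((k : Int) + 1 + 1) 1
        = PySem.List.pyRange 1 ((k : Int) + 1) 1 ++ [(k : Int) + 1] := by
      have := PySem.List.pyRange_one_succ_right (a := 1) (b := (k : Int) + 1) (by omega)
      simpa using this
    have hfd : ∀ (xs : List Int) (a x : Int),
        (xs ++ [x]).foldl (fun acc i => acc + price * i) a
          = xs.foldl (fun acc i => acc + price * i) a + price * x := by
      intro xs a x; simp [List.foldl_append]
    push_cast
    rw [h, hfd]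
    ring_nf
    ring_nf at ih
    rw [mul_comm] at ih ⊢
    omega

theorem solution_eq (price money count : Int) :
    solution price money count = solution_alt price money count := by
  simp only [solution, solution_alt]
  by_cases hc : count ≤ 0
  · rw [PySem.List.pyRange_one_eq_nil (by omega)]
    have hm : max count 0 = 0 := by omega
    rw [hm]
    simp only [List.foldl_nil]
    have h0 : PySem.Int.floordiv (price * 0 * (0 + 1)) 2 = 0 := by
      simp [PySem.Int.floordiv]
    rw [h0]
    split_ifs with h
    · rw [abs_of_neg (by omega)]; omega
    · omega
  · have hm : max count 0 = count := by omega
    rw [hm]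
    obtain ⟨n, hn⟩ : ∃ n : Nat, count = (n : Int) := ⟨count.toNat, by omega⟩
    subst hn
    have hs := pv_sum_loop price n
    set S := (PySem.List.pyRange 1 ((n : Int) + 1) 1).foldl (fun acc i => acc + price * i) 0 with hS
    have hfd : PySem.Int.floordiv (price * (n : Int) * ((n : Int) + 1)) 2 = S := by
      rw [← hs]
      simp [PySem.Int.floordiv]
    rw [hfd]
    split_ifs with h
    · rw [abs_of_neg (by omega)]; omega
    · omega

-- ===== VERDICT (by name: the statement is the Claim_ definition above) =====
theorem solution_spec : Claim_equal_solution := by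
  intro price money count _
  exact solution_eq price money count
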